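-- pv_equiv track=rewrite | github.com/NathanVoldman/Shitot | capitalize.py | capitalize_2nd_letter
-- ===== SOURCE A (Python) =====
-- def capitalize_2nd_letter(x):
--     ans = ''
--     for i,c in enumerate(x):
--         if i==1:
--             ans = ans + c.upper()
--         else:
--             ans = ans + c
--     return ans
-- ===== SOURCE B (Python) =====
-- def capitalize_2nd_letter(x):
--     return x[:1] + x[1:2].upper() + x[2:]
-- ===== Notes on version B (the rewrite author's own statement) =====
-- stated objective: idiomatic
-- what changed: Replaces the enumerate loop with repeated string concatenation by a single branch-free slice expression x[:1] + x[1:2].upper() + x[2:].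
import Mathlib
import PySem

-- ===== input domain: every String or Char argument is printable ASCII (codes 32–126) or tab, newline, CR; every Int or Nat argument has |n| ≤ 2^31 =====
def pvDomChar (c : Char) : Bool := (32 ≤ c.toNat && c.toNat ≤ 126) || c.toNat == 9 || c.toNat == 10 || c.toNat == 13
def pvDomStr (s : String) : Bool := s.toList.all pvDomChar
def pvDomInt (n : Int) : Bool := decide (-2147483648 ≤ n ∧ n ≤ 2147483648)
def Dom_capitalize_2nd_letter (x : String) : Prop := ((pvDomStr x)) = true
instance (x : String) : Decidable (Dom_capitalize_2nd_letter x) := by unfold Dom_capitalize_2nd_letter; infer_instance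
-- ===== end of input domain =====

-- B replaces A's enumerate loop by the direct slice expression x[:1] + x[1:2].upper() + x[2:] (idiomatic; return value only).

-- ===== PORT A =====
-- literal port of the enumerate loop: ans = ans + c.upper() at i == 1, ans = ans + c otherwise
def capitalize_2nd_letter (x : String) : String :=
  String.ofList ((PySem.List.enumerate x.toList 0).foldl
    (fun ans (p : Int × Char) =>
      if p.1 == 1 then ans ++ [PySem.Chars.upperChar p.2] else ans ++ [p.2]) [])

-- ===== PORT B =====
-- x[:1] + x[1:2].upper() + x[2:]
def capitalize_2nd_letter_alt (x : String) : String :=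
  String.ofList (PySem.Chars.slice x.toList none (some 1)
    ++ PySem.Chars.upper (PySem.Chars.slice x.toList (some 1) (some 2))
    ++ PySem.Chars.slice x.toList (some 2) none)

-- ===== PRECONDITION & SPEC =====
def Spec_capitalize_2nd_letter (x : String) (out : String) : Prop := out = capitalize_2nd_letter_alt x
instance (x : String) (out : String) : Decidable (Spec_capitalize_2nd_letter x out) := by unfold Spec_capitalize_2nd_letter; infer_instance

-- ===== CLAIM (what is proved, stated in full; the proofs are below) =====
def Claim_equal_capitalize_2nd_letter : Prop := ∀ (x : String), Dom_capitalize_2nd_letter x → Spec_capitalize_2nd_letter x (capitalize_2nd_letter x)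

-- ===== LEMMAS AND PROOFS =====
-- past index 1, A's loop just appends the remaining characters unchanged
lemma cap2_fold_tail (t : List Char) (s : Int) (acc : List Char) (hs : 2 ≤ s) :
    (PySem.List.enumerate t s).foldl
      (fun ans (p : Int × Char) =>
        if p.1 == 1 then ans ++ [PySem.Chars.upperChar p.2] else ans ++ [p.2]) acc
      = acc ++ t := by
  induction t generalizing s acc with
  | nil => simp [PySem.List.enumerate_nil]
  | cons c t ih =>
    have h1 : (s == (1 : Int)) = false := by
      simp only [beq_eq_false_iff_ne]; omega
    rw [PySem.List.enumerate_cons]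
    simp only [List.foldl_cons, h1, Bool.false_eq_true, if_false]
    rw [ih (s + 1) _ (by omega)]
    simp

theorem capitalize_2nd_letter_spec : Claim_equal_capitalize_2nd_letter := by
  intro x _
  unfold Spec_capitalize_2nd_letter capitalize_2nd_letter capitalize_2nd_letter_alt
  congr 1
  match h : x.toList with
  | [] => simp [PySem.List.enumerate_nil, PySem.List.slice, PySem.Chars.upper]
  | [a] => simp [PySem.List.enumerate, PySem.List.slice, PySem.Chars.upper, PySem.List.clampIdx]
  | a :: b :: t =>
    rw [PySem.List.enumerate_cons, PySem.List.enumerate_cons]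
    simp only [List.foldl_cons, show ((0:Int) == 1) = false from rfl,
      show (((0:Int)+1) == 1) = true from rfl, show (0:Int)+1+1 = 2 from rfl, Bool.false_eq_true, if_false, if_true,
      List.nil_append]
    rw [cap2_fold_tail t 2 ([a] ++ [PySem.Chars.upperChar b]) (by omega)]
    simp [PySem.List.slice, PySem.Chars.upper, PySem.List.clampIdx]
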